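-- pv_equiv track=rewrite | github.com/OmuraCode/bot | bot/bot_model.py | clean
-- ===== SOURCE A (Python) =====
-- def clean(line):
--     cleaned_line = ''
--     for char in line:
--         if char.isalnum() or char.isspace():
--             cleaned_line += char
--         else:
--             cleaned_line += ' '
--     cleaned_line = ' '.join(cleaned_line.split())
--     return cleaned_line
-- ===== SOURCE B (Python) =====
-- def clean(line):
--     words = []
--     cur = ''
--     for char in line:
--         if char.isalnum():
--             cur += char
--         else:
--             if cur:
--                 words.append(cur)
--             cur = ''
--     if cur:
--         words.append(cur)
--     return ' '.join(words)
-- ===== Notes on version B (the rewrite author's own statement) =====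
-- stated objective: simpler
-- what changed: Single-pass tokenizer accumulating alphanumeric runs directly instead of building an intermediate cleaned string and then re-scanning it with split/join.
import Mathlib
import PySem

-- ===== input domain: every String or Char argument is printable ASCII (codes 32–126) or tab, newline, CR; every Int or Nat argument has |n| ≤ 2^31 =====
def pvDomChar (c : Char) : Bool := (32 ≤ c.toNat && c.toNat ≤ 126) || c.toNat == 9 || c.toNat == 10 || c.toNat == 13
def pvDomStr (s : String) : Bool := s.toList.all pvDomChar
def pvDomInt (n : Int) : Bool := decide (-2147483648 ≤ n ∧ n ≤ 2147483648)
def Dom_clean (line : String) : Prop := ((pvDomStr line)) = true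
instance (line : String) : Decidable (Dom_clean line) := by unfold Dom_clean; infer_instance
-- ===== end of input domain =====

-- Header: B is a single-pass tokenizer (accumulate alphanumeric runs, flush on any other
-- character) instead of A's "replace, then split and re-join" two-stage pass; objective: simpler.

-- ===== PORT A =====
-- for char in line: cleaned_line += char if char.isalnum() or char.isspace() else ' '
def clean (line : String) : String :=
  String.ofList (PySem.Chars.join [' '] (PySem.Chars.split₀ (line.toList.foldl
    (fun acc c => if PySem.Chars.isalnum c || PySem.Chars.isspace c then acc ++ [c] else acc ++ [' ']) [])))

-- ===== PORT B =====
-- one step of the tokenizer loop: state = (words so far, current word)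
def cleanStep (s : List (List Char) × List Char) (c : Char) : List (List Char) × List Char :=
  if PySem.Chars.isalnum c then (s.1, s.2 ++ [c])
  else if s.2 = [] then (s.1, []) else (s.1 ++ [s.2], [])

-- final flush: words ++ trailing current word if non-empty
def finishWords (s : List (List Char) × List Char) : List (List Char) :=
  if s.2 = [] then s.1 else s.1 ++ [s.2]

def clean_alt (line : String) : String :=
  String.ofList (PySem.Chars.join [' '] (finishWords (line.toList.foldl cleanStep ([], []))))

-- ===== PRECONDITION & SPEC =====
def Spec_clean (line : String) (out : String) : Prop := out = clean_alt line
instance (line : String) (out : String) : Decidable (Spec_clean line out) := by unfold Spec_clean; infer_instance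

-- ===== CLAIM (what is proved, stated in full; the proofs are below) =====
def Claim_equal_clean : Prop := ∀ (line : String), Dom_clean line → Spec_clean line (clean line)

-- ===== LEMMAS AND PROOFS =====

-- A's character map: what each input character contributes to cleaned_line
def cleanMap (c : Char) : Char :=
  if PySem.Chars.isalnum c || PySem.Chars.isspace c then c else ' '

theorem isalnum_not_isspace (c : Char) (h : PySem.Chars.isalnum c = true) :
    PySem.Chars.isspace c = false := by
  simp only [PySem.Chars.isalnum, PySem.Chars.isalpha, PySem.Chars.isupper, PySem.Chars.islower,
    PySem.Chars.isdigit, PySem.Chars.isspace, Char.le_def, UInt32.le_iff_toNat_le, Char.toNat,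
    Bool.or_eq_true, Bool.and_eq_true, decide_eq_true_eq] at h ⊢
  simp only [Bool.or_eq_false_iff, Bool.and_eq_false_iff, decide_eq_false_iff_not, not_le,
    show ('A').val.toNat = 65 from rfl, show ('Z').val.toNat = 90 from rfl,
    show ('a').val.toNat = 97 from rfl, show ('z').val.toNat = 122 from rfl,
    show ('0').val.toNat = 48 from rfl, show ('9').val.toNat = 57 from rfl] at h ⊢
  omega

theorem isspace_cleanMap (c : Char) :
    PySem.Chars.isspace (cleanMap c) = !PySem.Chars.isalnum c := by
  unfold cleanMap
  by_cases ha : PySem.Chars.isalnum c = true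
  · simp [ha, isalnum_not_isspace c ha]
  · by_cases hs : PySem.Chars.isspace c = true <;> simp_all <;> decide

theorem cleanMap_of_isalnum (c : Char) (h : PySem.Chars.isalnum c = true) :
    cleanMap c = c := by simp [cleanMap, h]

theorem cleanFold_eq_map (l : List Char) :
    l.foldl (fun acc c => if PySem.Chars.isalnum c || PySem.Chars.isspace c then acc ++ [c] else acc ++ [' ']) []
      = l.map cleanMap := by
  rw [PySem.List.foldl_congr_mem (l := l) (init := ([] : List Char))
    (f := fun acc c => if PySem.Chars.isalnum c || PySem.Chars.isspace c then acc ++ [c] else acc ++ [' '])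
    (g := fun acc c => acc ++ [cleanMap c]) (by
      intro acc c _
      unfold cleanMap
      by_cases h : (PySem.Chars.isalnum c || PySem.Chars.isspace c) = true
      · simp [h]
      · simp [h]),
    PySem.List.foldl_append_singleton_eq_map]
  simp

theorem split₀_go_eq_fold (cs : List Char) :
    ∀ (cur : List Char) (acc : List (List Char)),
    PySem.Chars.split₀.go (cs.map cleanMap) cur acc =
      finishWords (cs.foldl cleanStep (acc.reverse, cur.reverse)) := by
  induction cs with
  | nil =>
    intro cur acc
    simp only [List.map_nil, PySem.Chars.split₀.go, List.foldl_nil, finishWords]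
    by_cases h : cur = []
    · simp [h]
    · simp [h, List.isEmpty_iff]
  | cons c cs ih =>
    intro cur acc
    simp only [List.map_cons, PySem.Chars.split₀.go, List.foldl_cons]
    rw [isspace_cleanMap]
    by_cases ha : PySem.Chars.isalnum c = true
    · rw [if_neg (by simp [ha])]
      rw [cleanMap_of_isalnum c ha, ih (c :: cur) acc]
      simp [cleanStep, ha]
    · simp only [Bool.not_eq_true] at ha
      rw [if_pos (by simp [ha])]
      by_cases hc : cur = []
      · subst hc
        rw [ih [] acc]
        simp [cleanStep, ha]
      · simp only [List.isEmpty_iff, if_neg hc]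
        rw [ih [] (cur.reverse :: acc)]
        simp [cleanStep, ha, hc, List.reverse_eq_nil_iff]

-- ===== VERDICT (by name: the statement is the Claim_ definition above) =====
theorem clean_spec : Claim_equal_clean := by
  intro line _
  unfold Spec_clean clean clean_alt
  rw [cleanFold_eq_map]
  unfold PySem.Chars.split₀
  rw [split₀_go_eq_fold line.toList [] []]
  rfl
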